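-- pv_equiv track=rewrite | github.com/simonalvhage/AdventOfCode | 2025/day7/main.py | part1
-- ===== SOURCE A (Python) =====
-- def part1(data) -> int | None:
--     start_column = data[0].index("S")
--     beams = {start_column: 1}
--     splits = 0
--     for row in data[1:]:
--         next_beams = {}
--         for col in beams:
--             if row[col] == ".":
--                 next_beams[col] = 1
--             if row[col] == "^":
--                 splits += 1
--                 next_beams[col - 1] = 1
--                 next_beams[col + 1] = 1
--         beams = next_beams
--     return splits
-- ===== SOURCE B (Python) =====
-- def part1(data) -> int | None:
--     start_column = data[0].index("S")
--     splits = 0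
--     visited = set()
--     stack = [(1, start_column)] if len(data) > 1 else []
--     while stack:
--         row, col = stack.pop()
--         if (row, col) in visited:
--             continue
--         visited.add((row, col))
--         cell = data[row][col]
--         if cell == "^":
--             splits += 1
--             if row + 1 < len(data):
--                 stack.append((row + 1, col - 1))
--                 stack.append((row + 1, col + 1))
--         elif cell == ".":
--             if row + 1 < len(data):
--                 stack.append((row + 1, col))
--     return splits
-- ===== Notes on version B (the rewrite author's own statement) =====
-- stated objective: alternative
-- what changed: Replaces the per-row dict-of-beams simulation (rebuild a dict of live columns row by row, counting '^' hits in the rebuild loop) by graph reachability: a worklist DFS over (row,col) positions with a visited set, counting each distinct reachable '^' cell once.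
import Mathlib
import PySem

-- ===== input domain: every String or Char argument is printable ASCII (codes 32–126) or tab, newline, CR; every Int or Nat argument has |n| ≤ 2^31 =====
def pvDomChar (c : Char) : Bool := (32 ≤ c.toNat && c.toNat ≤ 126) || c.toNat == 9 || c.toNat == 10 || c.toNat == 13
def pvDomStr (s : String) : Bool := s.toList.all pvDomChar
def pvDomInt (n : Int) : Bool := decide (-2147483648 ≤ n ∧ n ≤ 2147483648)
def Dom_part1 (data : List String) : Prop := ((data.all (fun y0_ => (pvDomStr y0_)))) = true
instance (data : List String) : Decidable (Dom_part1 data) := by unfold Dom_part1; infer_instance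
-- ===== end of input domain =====

-- B replaces A's row-by-row dict simulation by a worklist search with a visited set over
-- (row, col) positions, counting each distinct reachable '^' cell once (objective: alternative).

-- ===== PORT A =====
-- Literal port of A. data[0] on [] and .index("S") raise in Python (excluded by Pre_);
-- the port reads headD "" / find (-1 when absent) there. row[col] raising IndexError is
-- pyGet? = none (excluded by Pre_); neither `if` fires then.
def part1 (data : List String) : Int :=
  let start_column : Int := PySem.Str.find (data.headD "") "S"
  let beams : PySem.Dict Int Int := PySem.Dict.empty.insert start_column 1
  let res := (data.drop 1).foldl
    (fun (st : PySem.Dict Int Int × Int) row =>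
      st.1.keys.foldl
        (fun (st2 : PySem.Dict Int Int × Int) col =>
          let next_beams := if PySem.Str.pyGet? row col = some '.' then st2.1.insert col 1 else st2.1
          if PySem.Str.pyGet? row col = some '^' then
            (((next_beams.insert (col - 1) 1).insert (col + 1) 1), st2.2 + 1)
          else (next_beams, st2.2))
        (PySem.Dict.empty, st.2))
    (beams, 0)
  res.2

-- ===== PORT B =====
-- The worklist loop of Source B (stack top = list head; Python pushes (col-1) then (col+1),
-- so the head order here is (col+1) then (col-1), exactly pop order).  data[row][col]
-- raising IndexError (excluded by Pre_) is pyGet? = none: no branch fires.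
def part1_go (data : List String) (stack : List (Nat × Int)) (visited : PySem.Set (Nat × Int))
    (splits : Int) : Int :=
  match stack with
  | [] => splits
  | (row, col) :: rest =>
    if (row, col) ∈ visited then part1_go data rest visited splits
    else
      let visited' := PySem.Set.add visited (row, col)
      let cell := PySem.Str.pyGet? (data.getD row "") col
      if cell = some '^' then
        if row + 1 < data.length then
          part1_go data ((row + 1, col + 1) :: (row + 1, col - 1) :: rest) visited' (splits + 1)
        else part1_go data rest visited' (splits + 1)
      else if cell = some '.' then
        if row + 1 < data.length then part1_go data ((row + 1, col) :: rest) visited' splits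
        else part1_go data rest visited' splits
      else part1_go data rest visited' splits
termination_by (stack.map (fun p => 3 ^ (data.length - p.1))).sum
decreasing_by
  all_goals simp only [List.map_cons, List.sum_cons]
  all_goals have h3 : 0 < 3 ^ (data.length - row) := by positivity
  · omega
  · have he : data.length - row = (data.length - (row + 1)) + 1 := by omega
    rw [he, pow_succ]
    have h4 : 0 < 3 ^ (data.length - (row + 1)) := by positivity
    omega
  · omega
  · have he : data.length - row = (data.length - (row + 1)) + 1 := by omega
    rw [he, pow_succ]
    have h4 : 0 < 3 ^ (data.length - (row + 1)) := by positivity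
    omega
  · omega
  · omega

def part1_alt (data : List String) : Int :=
  let start_column : Int := PySem.Str.find (data.headD "") "S"
  let stack : List (Nat × Int) := if 1 < data.length then [(1, start_column)] else []
  part1_go data stack PySem.Set.empty 0

-- ===== PRECONDITION & SPEC =====

-- the starting column (both Pythons compute it as data[0].index("S"))
def sIdx (data : List String) : Int := PySem.Str.find (data.headD "") "S"

-- columns alive in the next row, given the columns alive in this row
def nextF (row : String) (S : Finset Int) : Finset Int :=
  S.filter (fun c => PySem.Str.pyGet? row c = some '.') ∪
    (S.filter (fun c => PySem.Str.pyGet? row c = some '^')).image (fun c => c - 1) ∪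
    (S.filter (fun c => PySem.Str.pyGet? row c = some '^')).image (fun c => c + 1)

-- columns alive in row r (the positions both programs index)
def levF (data : List String) : Nat → Finset Int
  | 0 => ∅
  | 1 => {sIdx data}
  | (r + 2) => nextF (data.getD (r + 1) "") (levF data (r + 1))

-- Pre_ excludes exactly the inputs where the Python A raises: empty data / no "S" in data[0]
-- (IndexError / ValueError), and grids where some live beam position (r, c) — row r ≥ 1,
-- column c alive in row r per levF — indexes data[r] outside Python's index range
-- (IndexError).  B raises on exactly the same inputs, so Pre_ excludes no input on which
-- A returns a value.
def Pre_part1 (data : List String) : Prop :=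
  data ≠ [] ∧ PySem.Str.isIn "S" (data.headD "") = true ∧
    ∀ r, r < data.length → 1 ≤ r →
      ∀ c ∈ levF data r,
        -((data.getD r "").toList.length : Int) ≤ c ∧ c < ((data.getD r "").toList.length : Int)
instance (data : List String) : Decidable (Pre_part1 data) := by unfold Pre_part1; infer_instance

def pvWitness_part1 : List String := ["S..", "^..", "...."]

def Spec_part1 (data : List String) (out : Int) : Prop := out = part1_alt data
instance (data : List String) (out : Int) : Decidable (Spec_part1 data out) := by
  unfold Spec_part1; infer_instance

-- ===== CLAIM (what is proved, stated in full; the proofs are below) =====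
def Claim_equal_part1 : Prop :=
  ∀ (data : List String), Dom_part1 data → Pre_part1 data → Spec_part1 data (part1 data)

-- ===== LEMMAS AND PROOFS =====

-- successors of a position in B's search graph (matches the pushes of part1_go)
def succsB (data : List String) (p : Nat × Int) : List (Nat × Int) :=
  let cell := PySem.Str.pyGet? (data.getD p.1 "") p.2
  if cell = some '^' then
    if p.1 + 1 < data.length then [(p.1 + 1, p.2 + 1), (p.1 + 1, p.2 - 1)] else []
  else if cell = some '.' then
    if p.1 + 1 < data.length then [(p.1 + 1, p.2)] else []
  else []

def markB (data : List String) (p : Nat × Int) : Bool :=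
  decide (PySem.Str.pyGet? (data.getD p.1 "") p.2 = some '^')

-- the visited set part1_go ends with (same recursion, returning the set instead of the count)
def part1_gov (data : List String) (stack : List (Nat × Int))
    (visited : PySem.Set (Nat × Int)) : PySem.Set (Nat × Int) :=
  match stack with
  | [] => visited
  | (row, col) :: rest =>
    if (row, col) ∈ visited then part1_gov data rest visited
    else
      let visited' := PySem.Set.add visited (row, col)
      let cell := PySem.Str.pyGet? (data.getD row "") col
      if cell = some '^' then
        if row + 1 < data.length then
          part1_gov data ((row + 1, col + 1) :: (row + 1, col - 1) :: rest) visited'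
        else part1_gov data rest visited'
      else if cell = some '.' then
        if row + 1 < data.length then part1_gov data ((row + 1, col) :: rest) visited'
        else part1_gov data rest visited'
      else part1_gov data rest visited'
termination_by (stack.map (fun p => 3 ^ (data.length - p.1))).sum
decreasing_by
  all_goals simp only [List.map_cons, List.sum_cons]
  all_goals have h3 : 0 < 3 ^ (data.length - row) := by positivity
  · omega
  · have he : data.length - row = (data.length - (row + 1)) + 1 := by omega
    rw [he, pow_succ]
    have h4 : 0 < 3 ^ (data.length - (row + 1)) := by positivity
    omega
  · omega
  · have he : data.length - row = (data.length - (row + 1)) + 1 := by omega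
    rw [he, pow_succ]
    have h4 : 0 < 3 ^ (data.length - (row + 1)) := by positivity
    omega
  · omega
  · omega

inductive ReachB (data : List String) (p0 : Nat × Int) : Nat × Int → Prop
  | refl : ReachB data p0 p0
  | step {p q : Nat × Int} : ReachB data p0 p → q ∈ succsB data p → ReachB data p0 q

def rowCnt (data : List String) (r : Nat) : Nat :=
  ((levF data r).filter (fun c => PySem.Str.pyGet? (data.getD r "") c = some '^')).card

-- A's row loop, abstracted to sets of live columns
def specA : List String → Finset Int → Int
  | [], _ => 0
  | row :: rs, S =>
    ((S.filter (fun c => PySem.Str.pyGet? row c = some '^')).card : Int) + specA rs (nextF row S)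

lemma countP_markB_add (data : List String) (V : PySem.Set (Nat × Int)) (p : Nat × Int)
    (h : p ∉ V) :
    (PySem.Set.add V p).countP (markB data)
      = V.countP (markB data) + (if markB data p then 1 else 0) := by
  have hs : PySem.Set.add V p = V ++ [p] := by
    simp [PySem.Set.add, PySem.Set.contains, h]
  rw [hs, List.countP_append]
  simp [List.countP_cons]

lemma go_eq_gov (data : List String) (stack : List (Nat × Int))
    (V : PySem.Set (Nat × Int)) (a : Int) :
    part1_go data stack V a
      = a + ((part1_gov data stack V).countP (markB data) : Int)
          - (V.countP (markB data) : Int) := by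
  fun_induction part1_go data stack V a
  case case1 => simp [part1_gov]
  case case2 =>
    rename_i V a row col rest hnm ih
    have hg : part1_gov data ((row, col) :: rest) V = part1_gov data rest V := by
      rw [part1_gov.eq_def]; simp [hnm]
    rw [hg]; exact ih
  case case3 =>
    rename_i V a row col rest hnm v' cell hc hlt ih
    have hc' : PySem.List.pyGet? (data[row]?.getD "").toList col = some '^' := by
      simpa using (hc : PySem.Str.pyGet? (data.getD row "") col = some '^')
    have hg : part1_gov data ((row, col) :: rest) V
        = part1_gov data ((row + 1, col + 1) :: (row + 1, col - 1) :: rest)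
            (PySem.Set.add V (row, col)) := by
      rw [part1_gov.eq_def]; simp [hnm, hc', hlt]
    have hm : markB data (row, col) = true := by simp [markB, hc']
    rw [hg, ih, countP_markB_add data V (row, col) hnm, hm]
    try simp only [v']
    push_cast
    try simp
    try ring
    try omega
  case case4 =>
    rename_i V a row col rest hnm v' cell hc hlt ih
    have hc' : PySem.List.pyGet? (data[row]?.getD "").toList col = some '^' := by
      simpa using (hc : PySem.Str.pyGet? (data.getD row "") col = some '^')
    have hg : part1_gov data ((row, col) :: rest) V
        = part1_gov data rest (PySem.Set.add V (row, col)) := by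
      rw [part1_gov.eq_def]; simp [hnm, hc', hlt]
    have hm : markB data (row, col) = true := by simp [markB, hc']
    rw [hg, ih, countP_markB_add data V (row, col) hnm, hm]
    try simp only [v']
    push_cast
    try simp
    try ring
    try omega
  case case5 =>
    rename_i V a row col rest hnm v' cell hc2 hc hlt ih
    have hc2' : ¬ PySem.List.pyGet? (data[row]?.getD "").toList col = some '^' := by
      simpa using (hc2 : ¬ PySem.Str.pyGet? (data.getD row "") col = some '^')
    have hc' : PySem.List.pyGet? (data[row]?.getD "").toList col = some '.' := by
      simpa using (hc : PySem.Str.pyGet? (data.getD row "") col = some '.')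
    have hg : part1_gov data ((row, col) :: rest) V
        = part1_gov data ((row + 1, col) :: rest) (PySem.Set.add V (row, col)) := by
      rw [part1_gov.eq_def]; simp [hnm, hc', hlt]
    have hm : markB data (row, col) = false := by simp [markB, hc2']
    rw [hg, ih, countP_markB_add data V (row, col) hnm, hm]
    try simp only [v']
    push_cast
    try simp
    try ring
    try omega
  case case6 =>
    rename_i V a row col rest hnm v' cell hc2 hc hlt ih
    have hc2' : ¬ PySem.List.pyGet? (data[row]?.getD "").toList col = some '^' := by
      simpa using (hc2 : ¬ PySem.Str.pyGet? (data.getD row "") col = some '^')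
    have hc' : PySem.List.pyGet? (data[row]?.getD "").toList col = some '.' := by
      simpa using (hc : PySem.Str.pyGet? (data.getD row "") col = some '.')
    have hg : part1_gov data ((row, col) :: rest) V
        = part1_gov data rest (PySem.Set.add V (row, col)) := by
      rw [part1_gov.eq_def]; simp [hnm, hc', hlt]
    have hm : markB data (row, col) = false := by simp [markB, hc2']
    rw [hg, ih, countP_markB_add data V (row, col) hnm, hm]
    try simp only [v']
    push_cast
    try simp
    try ring
    try omega
  case case7 =>
    rename_i V a row col rest hnm v' cell hc2 hc3 ih
    have hc2' : ¬ PySem.List.pyGet? (data[row]?.getD "").toList col = some '^' := by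
      simpa using (hc2 : ¬ PySem.Str.pyGet? (data.getD row "") col = some '^')
    have hc3' : ¬ PySem.List.pyGet? (data[row]?.getD "").toList col = some '.' := by
      simpa using (hc3 : ¬ PySem.Str.pyGet? (data.getD row "") col = some '.')
    have hg : part1_gov data ((row, col) :: rest) V
        = part1_gov data rest (PySem.Set.add V (row, col)) := by
      rw [part1_gov.eq_def]; simp [hnm, hc2', hc3']
    have hm : markB data (row, col) = false := by simp [markB, hc2']
    rw [hg, ih, countP_markB_add data V (row, col) hnm, hm]
    try simp only [v']
    push_cast
    try simp
    try ring
    try omega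

lemma gov_mono (data : List String) (stack : List (Nat × Int)) (V : PySem.Set (Nat × Int)) :
    ∀ x ∈ V, x ∈ part1_gov data stack V := by
  fun_induction part1_gov data stack V
  case case1 => exact fun x hx => hx
  all_goals rename_i ih
  all_goals intro x hx
  all_goals first
    | exact ih x hx
    | exact ih x ((PySem.Set.mem_add _ _ x).mpr (Or.inl hx))

lemma gov_stack (data : List String) (stack : List (Nat × Int)) (V : PySem.Set (Nat × Int)) :
    ∀ p ∈ stack, p ∈ part1_gov data stack V := by
  fun_induction part1_gov data stack V
  case case1 => simp
  all_goals rename_i ih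
  all_goals intro p hp
  all_goals rcases List.mem_cons.mp hp with h | h
  all_goals first
    | (subst h; exact gov_mono data _ _ _ ((PySem.Set.mem_add _ _ _).mpr (Or.inr rfl)))
    | (subst h; exact gov_mono data _ _ _ (by assumption))
    | exact ih p h
    | exact ih p (by simp [h])

lemma gov_nodup (data : List String) (stack : List (Nat × Int)) (V : PySem.Set (Nat × Int))
    (h : V.Nodup) : (part1_gov data stack V).Nodup := by
  revert h
  fun_induction part1_gov data stack V
  case case1 => exact fun h => h
  all_goals rename_i ih
  all_goals first
    | exact ih
    | exact fun h => ih (PySem.Set.nodup_add _ _ h)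

lemma gov_sound (data : List String) (R : Nat × Int → Prop)
    (hR : ∀ p q, R p → q ∈ succsB data p → R q) (stack : List (Nat × Int))
    (V : PySem.Set (Nat × Int)) (hs : ∀ p ∈ stack, R p) (hv : ∀ x ∈ V, R x) :
    ∀ x ∈ part1_gov data stack V, R x := by
  revert hs hv
  fun_induction part1_gov data stack V
  case case1 => exact fun _ hv x hx => hv x hx
  case case2 =>
    rename_i V row col rest hnm ih
    intro hs hv
    exact ih (fun p hp => hs p (List.mem_cons_of_mem _ hp)) hv
  case case3 =>
    rename_i V row col rest hnm v' cell hc hlt ih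
    have hc' : PySem.List.pyGet? (data[row]?.getD "").toList col = some '^' := by
      simpa using (hc : PySem.Str.pyGet? (data.getD row "") col = some '^')
    intro hs hv
    have hhead : R (row, col) := hs _ List.mem_cons_self
    apply ih
    · intro p hp
      rcases List.mem_cons.mp hp with h | hp2
      · exact h ▸ hR _ _ hhead (by simp [succsB, hc', hlt])
      rcases List.mem_cons.mp hp2 with h | h
      · exact h ▸ hR _ _ hhead (by simp [succsB, hc', hlt])
      · exact hs p (List.mem_cons_of_mem _ h)
    · intro x hx
      rcases (PySem.Set.mem_add _ _ _).mp hx with h | h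
      · exact hv x h
      · exact h ▸ hhead
  case case4 =>
    rename_i V row col rest hnm v' cell hc hlt ih
    intro hs hv
    apply ih (fun p hp => hs p (List.mem_cons_of_mem _ hp))
    intro x hx
    rcases (PySem.Set.mem_add _ _ _).mp hx with h | h
    · exact hv x h
    · exact h ▸ hs _ List.mem_cons_self
  case case5 =>
    rename_i V row col rest hnm v' cell hc2 hc hlt ih
    have hc2' : ¬ PySem.List.pyGet? (data[row]?.getD "").toList col = some '^' := by
      simpa using (hc2 : ¬ PySem.Str.pyGet? (data.getD row "") col = some '^')
    have hc' : PySem.List.pyGet? (data[row]?.getD "").toList col = some '.' := by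
      simpa using (hc : PySem.Str.pyGet? (data.getD row "") col = some '.')
    intro hs hv
    have hhead : R (row, col) := hs _ List.mem_cons_self
    apply ih
    · intro p hp
      rcases List.mem_cons.mp hp with h | h
      · exact h ▸ hR _ _ hhead (by simp [succsB, hc', hlt])
      · exact hs p (List.mem_cons_of_mem _ h)
    · intro x hx
      rcases (PySem.Set.mem_add _ _ _).mp hx with h | h
      · exact hv x h
      · exact h ▸ hhead
  case case6 =>
    rename_i V row col rest hnm v' cell hc2 hc hlt ih
    intro hs hv
    apply ih (fun p hp => hs p (List.mem_cons_of_mem _ hp))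
    intro x hx
    rcases (PySem.Set.mem_add _ _ _).mp hx with h | h
    · exact hv x h
    · exact h ▸ hs _ List.mem_cons_self
  case case7 =>
    rename_i V row col rest hnm v' cell hc2 hc3 ih
    intro hs hv
    apply ih (fun p hp => hs p (List.mem_cons_of_mem _ hp))
    intro x hx
    rcases (PySem.Set.mem_add _ _ _).mp hx with h | h
    · exact hv x h
    · exact h ▸ hs _ List.mem_cons_self

lemma gov_closed (data : List String) (stack : List (Nat × Int)) (V : PySem.Set (Nat × Int))
    (h : ∀ x ∈ V, ∀ q ∈ succsB data x, q ∈ V ∨ q ∈ stack) :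
    ∀ x ∈ part1_gov data stack V, ∀ q ∈ succsB data x, q ∈ part1_gov data stack V := by
  revert h
  fun_induction part1_gov data stack V
  case case1 =>
    intro h x hx q hq
    rcases h x hx q hq with hv | hstk
    · simpa [part1_gov] using hv
    · exact absurd hstk (List.not_mem_nil)
  case case2 =>
    rename_i V row col rest hm ih
    intro h
    apply ih
    intro x hx q hq
    rcases h x hx q hq with hv | hstk
    · exact Or.inl hv
    rcases List.mem_cons.mp hstk with he | ht
    · exact Or.inl (he ▸ hm)
    · exact Or.inr ht
  case case3 =>
    rename_i V row col rest hnm v' cell hc hlt ih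
    have hc' : PySem.List.pyGet? (data[row]?.getD "").toList col = some '^' := by
      simpa using (hc : PySem.Str.pyGet? (data.getD row "") col = some '^')
    intro h
    apply ih
    intro x hx q hq
    rcases (PySem.Set.mem_add _ _ _).mp hx with hxv | hxp
    · rcases h x hxv q hq with hv | hstk
      · exact Or.inl ((PySem.Set.mem_add _ _ _).mpr (Or.inl hv))
      rcases List.mem_cons.mp hstk with he | ht
      · exact Or.inl ((PySem.Set.mem_add _ _ _).mpr (Or.inr he))
      · exact Or.inr (by simp [ht])
    · subst hxp
      have : q ∈ [(row + 1, col + 1), (row + 1, col - 1)] := by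
        simpa [succsB, hc', hlt] using hq
      rcases List.mem_cons.mp this with he | ht
      · exact Or.inr (by simp [he])
      · exact Or.inr (by simp at ht; simp [ht])
  case case4 =>
    rename_i V row col rest hnm v' cell hc hlt ih
    have hc' : PySem.List.pyGet? (data[row]?.getD "").toList col = some '^' := by
      simpa using (hc : PySem.Str.pyGet? (data.getD row "") col = some '^')
    intro h
    apply ih
    intro x hx q hq
    rcases (PySem.Set.mem_add _ _ _).mp hx with hxv | hxp
    · rcases h x hxv q hq with hv | hstk
      · exact Or.inl ((PySem.Set.mem_add _ _ _).mpr (Or.inl hv))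
      rcases List.mem_cons.mp hstk with he | ht
      · exact Or.inl ((PySem.Set.mem_add _ _ _).mpr (Or.inr he))
      · exact Or.inr ht
    · subst hxp
      simp [succsB, hc', hlt] at hq
  case case5 =>
    rename_i V row col rest hnm v' cell hc2 hc hlt ih
    have hc2' : ¬ PySem.List.pyGet? (data[row]?.getD "").toList col = some '^' := by
      simpa using (hc2 : ¬ PySem.Str.pyGet? (data.getD row "") col = some '^')
    have hc' : PySem.List.pyGet? (data[row]?.getD "").toList col = some '.' := by
      simpa using (hc : PySem.Str.pyGet? (data.getD row "") col = some '.')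
    intro h
    apply ih
    intro x hx q hq
    rcases (PySem.Set.mem_add _ _ _).mp hx with hxv | hxp
    · rcases h x hxv q hq with hv | hstk
      · exact Or.inl ((PySem.Set.mem_add _ _ _).mpr (Or.inl hv))
      rcases List.mem_cons.mp hstk with he | ht
      · exact Or.inl ((PySem.Set.mem_add _ _ _).mpr (Or.inr he))
      · exact Or.inr (by simp [ht])
    · subst hxp
      have : q = (row + 1, col) := by simpa [succsB, hc', hlt] using hq
      exact Or.inr (by simp [this])
  case case6 =>
    rename_i V row col rest hnm v' cell hc2 hc hlt ih
    have hc2' : ¬ PySem.List.pyGet? (data[row]?.getD "").toList col = some '^' := by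
      simpa using (hc2 : ¬ PySem.Str.pyGet? (data.getD row "") col = some '^')
    have hc' : PySem.List.pyGet? (data[row]?.getD "").toList col = some '.' := by
      simpa using (hc : PySem.Str.pyGet? (data.getD row "") col = some '.')
    intro h
    apply ih
    intro x hx q hq
    rcases (PySem.Set.mem_add _ _ _).mp hx with hxv | hxp
    · rcases h x hxv q hq with hv | hstk
      · exact Or.inl ((PySem.Set.mem_add _ _ _).mpr (Or.inl hv))
      rcases List.mem_cons.mp hstk with he | ht
      · exact Or.inl ((PySem.Set.mem_add _ _ _).mpr (Or.inr he))
      · exact Or.inr ht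
    · subst hxp
      simp [succsB, hc', hlt] at hq
  case case7 =>
    rename_i V row col rest hnm v' cell hc2 hc3 ih
    have hc2' : ¬ PySem.List.pyGet? (data[row]?.getD "").toList col = some '^' := by
      simpa using (hc2 : ¬ PySem.Str.pyGet? (data.getD row "") col = some '^')
    have hc3' : ¬ PySem.List.pyGet? (data[row]?.getD "").toList col = some '.' := by
      simpa using (hc3 : ¬ PySem.Str.pyGet? (data.getD row "") col = some '.')
    intro h
    apply ih
    intro x hx q hq
    rcases (PySem.Set.mem_add _ _ _).mp hx with hxv | hxp
    · rcases h x hxv q hq with hv | hstk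
      · exact Or.inl ((PySem.Set.mem_add _ _ _).mpr (Or.inl hv))
      rcases List.mem_cons.mp hstk with he | ht
      · exact Or.inl ((PySem.Set.mem_add _ _ _).mpr (Or.inr he))
      · exact Or.inr ht
    · subst hxp
      simp [succsB, hc2', hc3'] at hq

lemma levF_succ (data : List String) (r : Nat) (hr : 1 ≤ r) :
    levF data (r + 1) = nextF (data.getD r "") (levF data r) := by
  cases r with
  | zero => omega
  | succ r => rfl

lemma reach_iff (data : List String) (h1 : 1 < data.length) (p : Nat × Int) :
    ReachB data (1, sIdx data) p ↔ 1 ≤ p.1 ∧ p.1 < data.length ∧ p.2 ∈ levF data p.1 := by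
  constructor
  · intro h
    induction h with
    | refl => exact ⟨le_refl 1, h1, by simp [levF]⟩
    | step hprev hq ih =>
      rename_i p q
      obtain ⟨hp1, hp2, hp3⟩ := ih
      by_cases hcell : PySem.Str.pyGet? (data.getD p.1 "") p.2 = some '^'
      · have hcN : PySem.List.pyGet? (data[p.1]?.getD "").toList p.2 = some '^' := by
          simpa using hcell
        by_cases hlt : p.1 + 1 < data.length
        · have hq' : q ∈ [(p.1 + 1, p.2 + 1), (p.1 + 1, p.2 - 1)] := by
            simpa [succsB, hcN, hlt] using hq
          have hlev := levF_succ data p.1 hp1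
          rcases List.mem_cons.mp hq' with he | ht
          · subst he
            refine ⟨by omega, by simpa using hlt, ?_⟩
            rw [hlev]
            simp only [nextF, Finset.mem_union, Finset.mem_image, Finset.mem_filter]
            exact Or.inr ⟨p.2, ⟨hp3, hcell⟩, rfl⟩
          · have he : q = (p.1 + 1, p.2 - 1) := by simpa using ht
            subst he
            refine ⟨by omega, by simpa using hlt, ?_⟩
            rw [hlev]
            simp only [nextF, Finset.mem_union, Finset.mem_image, Finset.mem_filter]
            exact Or.inl (Or.inr ⟨p.2, ⟨hp3, hcell⟩, rfl⟩)
        · simp [succsB, hcN, hlt] at hq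
      · have hcN : ¬ PySem.List.pyGet? (data[p.1]?.getD "").toList p.2 = some '^' := by
          simpa using hcell
        by_cases hdot : PySem.Str.pyGet? (data.getD p.1 "") p.2 = some '.'
        · have hdN : PySem.List.pyGet? (data[p.1]?.getD "").toList p.2 = some '.' := by
            simpa using hdot
          by_cases hlt : p.1 + 1 < data.length
          · have hq' : q = (p.1 + 1, p.2) := by simpa [succsB, hdN, hlt] using hq
            subst hq'
            refine ⟨by omega, by simpa using hlt, ?_⟩
            rw [levF_succ data p.1 hp1]
            simp only [nextF, Finset.mem_union, Finset.mem_filter]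
            exact Or.inl (Or.inl ⟨hp3, hdot⟩)
          · simp [succsB, hdN, hlt] at hq
        · have hdN : ¬ PySem.List.pyGet? (data[p.1]?.getD "").toList p.2 = some '.' := by
            simpa using hdot
          simp [succsB, hcN, hdN] at hq
  · rintro ⟨hp1, hp2, hp3⟩
    obtain ⟨r, c⟩ := p
    simp only at hp1 hp2 hp3
    revert hp2 hp3
    induction r, hp1 using Nat.le_induction generalizing c with
    | base =>
      intro hp2 hp3
      have : c = sIdx data := by simpa [levF] using hp3
      subst this
      exact ReachB.refl
    | succ r hr ih =>
      intro hp2 hp3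
      rw [levF_succ data r hr] at hp3
      simp only [nextF, Finset.mem_union, Finset.mem_image, Finset.mem_filter] at hp3
      rcases hp3 with (⟨hcl, hdot⟩ | ⟨c0, ⟨hc0, hhat⟩, rfl⟩) | ⟨c0, ⟨hc0, hhat⟩, rfl⟩
      · refine ReachB.step (ih c (by omega) hcl) ?_
        have hdN : PySem.List.pyGet? (data[r]?.getD "").toList c = some '.' := by
          simpa using hdot
        have hcN : ¬ PySem.List.pyGet? (data[r]?.getD "").toList c = some '^' := by
          rw [hdN]; simp
        simp [succsB, hdN, hp2]
      · refine ReachB.step (ih c0 (by omega) hc0) ?_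
        have hhN : PySem.List.pyGet? (data[r]?.getD "").toList c0 = some '^' := by
          simpa using hhat
        simp [succsB, hhN, hp2]
      · refine ReachB.step (ih c0 (by omega) hc0) ?_
        have hhN : PySem.List.pyGet? (data[r]?.getD "").toList c0 = some '^' := by
          simpa using hhat
        simp [succsB, hhN, hp2]

lemma count_W (data : List String) (h1 : 1 < data.length) :
    ((part1_gov data [(1, sIdx data)] PySem.Set.empty).countP (markB data) : Int)
      = ∑ r ∈ Finset.Ico 1 data.length, (rowCnt data r : Int) := by
  classical
  set W := part1_gov data [(1, sIdx data)] PySem.Set.empty with hW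
  have hmem : ∀ p : Nat × Int, p ∈ W ↔ 1 ≤ p.1 ∧ p.1 < data.length ∧ p.2 ∈ levF data p.1 := by
    intro p
    constructor
    · intro hp
      refine (reach_iff data h1 p).mp ?_
      refine gov_sound data _ (fun a b ha hb => ReachB.step ha hb) _ _ ?_ ?_ p hp
      · intro q hq
        rcases List.mem_cons.mp hq with he | h
        · exact he ▸ ReachB.refl
        · exact absurd h (List.not_mem_nil)
      · intro x hx
        simp [PySem.Set.empty] at hx
    · intro hp
      have hr := (reach_iff data h1 p).mpr hp
      induction hr with
      | refl => exact gov_stack data _ _ _ List.mem_cons_self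
      | step hprev hq ih =>
        exact gov_closed data _ _ (fun x hx => by simp [PySem.Set.empty] at hx) _
          (ih (by exact (reach_iff data h1 _).mp hprev |> fun h => h)) _ hq
  have hnd : W.Nodup := gov_nodup data _ _ (by simp [PySem.Set.empty])
  have hndf : (W.filter (markB data)).Nodup := hnd.filter _
  have hTeq : (W.filter (markB data)).toFinset
      = (Finset.Ico 1 data.length).biUnion (fun r =>
          ((levF data r).filter (fun c => PySem.Str.pyGet? (data.getD r "") c = some '^')).image
            (fun c => ((r, c) : Nat × Int))) := by
    ext p
    obtain ⟨r, c⟩ := p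
    simp only [List.mem_toFinset, List.mem_filter, Finset.mem_biUnion, Finset.mem_Ico,
      Finset.mem_image, Finset.mem_filter, hmem, markB]
    constructor
    · rintro ⟨⟨hr1, hrn, hcl⟩, hmk⟩
      exact ⟨r, ⟨hr1, hrn⟩, c, ⟨hcl, of_decide_eq_true hmk⟩, rfl⟩
    · rintro ⟨r', ⟨hr1, hrn⟩, c', ⟨hcl, hmk⟩, heq⟩
      obtain ⟨rfl, rfl⟩ := Prod.mk.injEq r' c' r c ▸ heq
      exact ⟨⟨hr1, hrn, hcl⟩, decide_eq_true hmk⟩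
  have hTcard : ((Finset.Ico 1 data.length).biUnion (fun r =>
          ((levF data r).filter (fun c => PySem.Str.pyGet? (data.getD r "") c = some '^')).image
            (fun c => ((r, c) : Nat × Int)))).card
      = ∑ r ∈ Finset.Ico 1 data.length, rowCnt data r := by
    rw [Finset.card_biUnion]
    · refine Finset.sum_congr rfl (fun r hr => ?_)
      rw [Finset.card_image_of_injective _ (fun a b hab => by simpa using hab)]
      rfl
    · intro r hr r' hr' hne
      simp only [Function.onFun]
      rw [Finset.disjoint_left]
      rintro p hp hp'
      simp only [Finset.mem_image, Finset.mem_filter] at hp hp'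
      obtain ⟨c, _, rfl⟩ := hp
      obtain ⟨c', _, h⟩ := hp'
      injection h with h1 h2
      exact hne h1.symm
  have hcnt : W.countP (markB data) = ∑ r ∈ Finset.Ico 1 data.length, rowCnt data r := by
    rw [List.countP_eq_length_filter, ← List.toFinset_card_of_nodup hndf, hTeq, hTcard]
  rw [hcnt]
  push_cast
  rfl

lemma specA_sum (data : List String) (k j : Nat) (hk : data.length - j ≤ k) (hj : 1 ≤ j) :
    specA (data.drop j) (levF data j)
      = ∑ r ∈ Finset.Ico j data.length, (rowCnt data r : Int) := by
  induction k generalizing j with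
  | zero =>
    have hle : data.length ≤ j := by omega
    rw [List.drop_eq_nil_of_le hle, Finset.Ico_eq_empty (by omega)]
    simp [specA]
  | succ k ih =>
    by_cases hjn : j < data.length
    · have hdrop : data.drop j = data[j] :: data.drop (j + 1) := List.drop_eq_getElem_cons hjn
      rw [hdrop]
      simp only [specA]
      have hget : (data[j]'hjn) = data.getD j "" := (List.getD_eq_getElem data "" hjn).symm
      rw [hget, (levF_succ data j hj).symm, ih (j + 1) (by omega) (by omega),
        Finset.sum_eq_sum_Ico_succ_bot hjn]
      rfl
    · have hle : data.length ≤ j := by omega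
      rw [List.drop_eq_nil_of_le hle, Finset.Ico_eq_empty (by omega)]
      simp [specA]

lemma countP_card (l : List Int) (hl : l.Nodup) (q : Int → Prop) [DecidablePred q] :
    (l.toFinset.filter q).card = l.countP (fun x => decide (q x)) := by
  classical
  have h : (l.filter (fun x => decide (q x))).toFinset = l.toFinset.filter q := by
    ext x
    simp
  rw [← h, List.toFinset_card_of_nodup (hl.filter _), List.countP_eq_length_filter]

lemma inner_snd (row : String) (cols : List Int) : ∀ (nb : PySem.Dict Int Int) (a : Int),
    ((cols.foldl (fun (st2 : PySem.Dict Int Int × Int) col =>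
        let next_beams := if PySem.Str.pyGet? row col = some '.' then st2.1.insert col 1 else st2.1
        if PySem.Str.pyGet? row col = some '^' then
          (((next_beams.insert (col - 1) 1).insert (col + 1) 1), st2.2 + 1)
        else (next_beams, st2.2)) (nb, a)).2
      = a + (cols.countP (fun c => decide (PySem.Str.pyGet? row c = some '^')) : Int)) := by
  induction cols with
  | nil => intro nb a; simp
  | cons c cs ih =>
    intro nb a
    have hstep : (let next_beams := if PySem.Str.pyGet? row c = some '.' then (nb, a).1.insert c 1 else (nb, a).1;
        if PySem.Str.pyGet? row c = some '^' then
          (((next_beams.insert (c - 1) 1).insert (c + 1) 1), (nb, a).2 + 1)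
        else (next_beams, (nb, a).2))
        = (if PySem.Str.pyGet? row c = some '^' then
            (((if PySem.Str.pyGet? row c = some '.' then nb.insert c 1 else nb).insert (c - 1) 1).insert (c + 1) 1, a + 1)
          else (if PySem.Str.pyGet? row c = some '.' then nb.insert c 1 else nb, a)) := rfl
    rw [List.foldl_cons, hstep, List.countP_cons]
    by_cases hc : PySem.Str.pyGet? row c = some '^'
    · have hcN : PySem.List.pyGet? row.toList c = some '^' := by simpa using hc
      rw [if_pos hc, ih]
      simp [hcN]
      ring
    · have hcN : ¬ PySem.List.pyGet? row.toList c = some '^' := by simpa using hc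
      rw [if_neg hc, ih]
      simp [hcN]

lemma inner_keys (row : String) (cols : List Int) : ∀ (nb : PySem.Dict Int Int) (a : Int),
    ((cols.foldl (fun (st2 : PySem.Dict Int Int × Int) col =>
        let next_beams := if PySem.Str.pyGet? row col = some '.' then st2.1.insert col 1 else st2.1
        if PySem.Str.pyGet? row col = some '^' then
          (((next_beams.insert (col - 1) 1).insert (col + 1) 1), st2.2 + 1)
        else (next_beams, st2.2)) (nb, a)).1.keys.toFinset
      = nb.keys.toFinset ∪ nextF row cols.toFinset) := by
  induction cols with
  | nil => intro nb a; simp [nextF]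
  | cons c cs ih =>
    intro nb a
    have hstep : (let next_beams := if PySem.Str.pyGet? row c = some '.' then (nb, a).1.insert c 1 else (nb, a).1;
        if PySem.Str.pyGet? row c = some '^' then
          (((next_beams.insert (c - 1) 1).insert (c + 1) 1), (nb, a).2 + 1)
        else (next_beams, (nb, a).2))
        = (if PySem.Str.pyGet? row c = some '^' then
            (((if PySem.Str.pyGet? row c = some '.' then nb.insert c 1 else nb).insert (c - 1) 1).insert (c + 1) 1, a + 1)
          else (if PySem.Str.pyGet? row c = some '.' then nb.insert c 1 else nb, a)) := rfl
    rw [List.foldl_cons, hstep]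
    by_cases hc : PySem.Str.pyGet? row c = some '^'
    · have hd : ¬ PySem.Str.pyGet? row c = some '.' := by rw [hc]; simp
      rw [if_pos hc, if_neg hd, ih]
      ext x
      simp only [Finset.mem_union, List.mem_toFinset, PySem.Dict.mem_keys_insert, nextF,
        Finset.mem_union, Finset.mem_image, Finset.mem_filter, List.toFinset_cons,
        Finset.mem_insert]
      constructor
      · rintro ((rfl | rfl | h) | ((⟨hm, hh⟩ | ⟨a0, ⟨hm, hh⟩, he⟩) | ⟨a0, ⟨hm, hh⟩, he⟩))
        · exact Or.inr (Or.inr ⟨c, ⟨Or.inl rfl, hc⟩, rfl⟩)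
        · exact Or.inr (Or.inl (Or.inr ⟨c, ⟨Or.inl rfl, hc⟩, rfl⟩))
        · exact Or.inl h
        · exact Or.inr (Or.inl (Or.inl ⟨Or.inr hm, hh⟩))
        · exact Or.inr (Or.inl (Or.inr ⟨a0, ⟨Or.inr hm, hh⟩, he⟩))
        · exact Or.inr (Or.inr ⟨a0, ⟨Or.inr hm, hh⟩, he⟩)
      · rintro (h | ((⟨(rfl | hm), hh⟩ | ⟨a0, ⟨(rfl | hm), hh⟩, he⟩) | ⟨a0, ⟨(rfl | hm), hh⟩, he⟩))
        · exact Or.inl (Or.inr (Or.inr h))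
        · exact absurd hh hd
        · exact Or.inr (Or.inl (Or.inl ⟨hm, hh⟩))
        · exact Or.inl (Or.inr (Or.inl he.symm))
        · exact Or.inr (Or.inl (Or.inr ⟨a0, ⟨hm, hh⟩, he⟩))
        · exact Or.inl (Or.inl he.symm)
        · exact Or.inr (Or.inr ⟨a0, ⟨hm, hh⟩, he⟩)
    · rw [if_neg hc, ih]
      by_cases hd : PySem.Str.pyGet? row c = some '.'
      · rw [if_pos hd]
        ext x
        simp only [Finset.mem_union, List.mem_toFinset, PySem.Dict.mem_keys_insert, nextF,
          Finset.mem_union, Finset.mem_image, Finset.mem_filter, List.toFinset_cons,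
          Finset.mem_insert]
        constructor
        · rintro ((rfl | h) | ((⟨hm, hh⟩ | ⟨a0, ⟨hm, hh⟩, he⟩) | ⟨a0, ⟨hm, hh⟩, he⟩))
          · exact Or.inr (Or.inl (Or.inl ⟨Or.inl rfl, hd⟩))
          · exact Or.inl h
          · exact Or.inr (Or.inl (Or.inl ⟨Or.inr hm, hh⟩))
          · exact Or.inr (Or.inl (Or.inr ⟨a0, ⟨Or.inr hm, hh⟩, he⟩))
          · exact Or.inr (Or.inr ⟨a0, ⟨Or.inr hm, hh⟩, he⟩)
        · rintro (h | ((⟨(rfl | hm), hh⟩ | ⟨a0, ⟨(rfl | hm), hh⟩, he⟩) | ⟨a0, ⟨(rfl | hm), hh⟩, he⟩))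
          · exact Or.inl (Or.inr h)
          · exact Or.inl (Or.inl rfl)
          · exact Or.inr (Or.inl (Or.inl ⟨hm, hh⟩))
          · exact absurd hh hc
          · exact Or.inr (Or.inl (Or.inr ⟨a0, ⟨hm, hh⟩, he⟩))
          · exact absurd hh hc
          · exact Or.inr (Or.inr ⟨a0, ⟨hm, hh⟩, he⟩)
      · rw [if_neg hd]
        ext x
        simp only [Finset.mem_union, List.mem_toFinset, nextF, Finset.mem_union,
          Finset.mem_image, Finset.mem_filter, List.toFinset_cons, Finset.mem_insert]
        constructor
        · rintro (h | ((⟨hm, hh⟩ | ⟨a0, ⟨hm, hh⟩, he⟩) | ⟨a0, ⟨hm, hh⟩, he⟩))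
          · exact Or.inl h
          · exact Or.inr (Or.inl (Or.inl ⟨Or.inr hm, hh⟩))
          · exact Or.inr (Or.inl (Or.inr ⟨a0, ⟨Or.inr hm, hh⟩, he⟩))
          · exact Or.inr (Or.inr ⟨a0, ⟨Or.inr hm, hh⟩, he⟩)
        · rintro (h | ((⟨(rfl | hm), hh⟩ | ⟨a0, ⟨(rfl | hm), hh⟩, he⟩) | ⟨a0, ⟨(rfl | hm), hh⟩, he⟩))
          · exact Or.inl h
          · exact absurd hh hd
          · exact Or.inr (Or.inl (Or.inl ⟨hm, hh⟩))
          · exact absurd hh hc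
          · exact Or.inr (Or.inl (Or.inr ⟨a0, ⟨hm, hh⟩, he⟩))
          · exact absurd hh hc
          · exact Or.inr (Or.inr ⟨a0, ⟨hm, hh⟩, he⟩)

lemma inner_nodup (row : String) (cols : List Int) : ∀ (nb : PySem.Dict Int Int) (a : Int),
    nb.keys.Nodup →
    ((cols.foldl (fun (st2 : PySem.Dict Int Int × Int) col =>
        let next_beams := if PySem.Str.pyGet? row col = some '.' then st2.1.insert col 1 else st2.1
        if PySem.Str.pyGet? row col = some '^' then
          (((next_beams.insert (col - 1) 1).insert (col + 1) 1), st2.2 + 1)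
        else (next_beams, st2.2)) (nb, a)).1.keys.Nodup) := by
  induction cols with
  | nil => intro nb a h; exact h
  | cons c cs ih =>
    intro nb a h
    have hstep : (let next_beams := if PySem.Str.pyGet? row c = some '.' then (nb, a).1.insert c 1 else (nb, a).1;
        if PySem.Str.pyGet? row c = some '^' then
          (((next_beams.insert (c - 1) 1).insert (c + 1) 1), (nb, a).2 + 1)
        else (next_beams, (nb, a).2))
        = (if PySem.Str.pyGet? row c = some '^' then
            (((if PySem.Str.pyGet? row c = some '.' then nb.insert c 1 else nb).insert (c - 1) 1).insert (c + 1) 1, a + 1)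
          else (if PySem.Str.pyGet? row c = some '.' then nb.insert c 1 else nb, a)) := rfl
    rw [List.foldl_cons, hstep]
    by_cases hc : PySem.Str.pyGet? row c = some '^' <;>
      by_cases hd : PySem.Str.pyGet? row c = some '.' <;>
        simp only [hc, hd, ite_false, if_pos] <;>
          apply ih <;>
            first
              | exact h
              | exact PySem.Dict.nodup_keys_insert _ _ _ h
              | exact PySem.Dict.nodup_keys_insert _ _ _
                  (PySem.Dict.nodup_keys_insert _ _ _ h)

lemma outer_fold (rows : List String) : ∀ (beams : PySem.Dict Int Int) (a : Int),
    beams.keys.Nodup →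
    ((rows.foldl (fun (st : PySem.Dict Int Int × Int) row =>
        st.1.keys.foldl
          (fun (st2 : PySem.Dict Int Int × Int) col =>
            let next_beams := if PySem.Str.pyGet? row col = some '.' then st2.1.insert col 1 else st2.1
            if PySem.Str.pyGet? row col = some '^' then
              (((next_beams.insert (col - 1) 1).insert (col + 1) 1), st2.2 + 1)
            else (next_beams, st2.2))
          (PySem.Dict.empty, st.2)) (beams, a)).2
      = a + specA rows beams.keys.toFinset) := by
  induction rows with
  | nil => intro beams a h; simp [specA]
  | cons row rs ih =>
    intro beams a h
    rw [List.foldl_cons]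
    have hpair : (beams.keys.foldl (fun (st2 : PySem.Dict Int Int × Int) col =>
        let next_beams := if PySem.Str.pyGet? row col = some '.' then st2.1.insert col 1 else st2.1
        if PySem.Str.pyGet? row col = some '^' then
          (((next_beams.insert (col - 1) 1).insert (col + 1) 1), st2.2 + 1)
        else (next_beams, st2.2)) (PySem.Dict.empty, a))
        = ((beams.keys.foldl (fun (st2 : PySem.Dict Int Int × Int) col =>
        let next_beams := if PySem.Str.pyGet? row col = some '.' then st2.1.insert col 1 else st2.1
        if PySem.Str.pyGet? row col = some '^' then
          (((next_beams.insert (col - 1) 1).insert (col + 1) 1), st2.2 + 1)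
        else (next_beams, st2.2)) (PySem.Dict.empty, a)).1,
           a + (beams.keys.countP (fun c => decide (PySem.Str.pyGet? row c = some '^')) : Int)) := by
      rw [← inner_snd row beams.keys PySem.Dict.empty a]
    rw [hpair, ih _ _ (inner_nodup row beams.keys PySem.Dict.empty a List.nodup_nil)]
    rw [inner_keys row beams.keys PySem.Dict.empty a]
    simp only [specA]
    rw [countP_card beams.keys h (fun c => PySem.Str.pyGet? row c = some '^')]
    have hek : (PySem.Dict.empty : PySem.Dict Int Int).keys.toFinset = (∅ : Finset Int) := rfl
    rw [hek, Finset.empty_union]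
    ring

lemma A_eq (data : List String) : part1 data = specA (data.drop 1) {sIdx data} := by
  have hk : ((PySem.Dict.empty : PySem.Dict Int Int).insert (PySem.Str.find (data.headD "") "S") (1 : Int)).keys
      = [PySem.Str.find (data.headD "") "S"] := by
    rw [PySem.Dict.keys_insert_of_not_contains]
    · rfl
    · rfl
  have h := outer_fold (data.drop 1)
    (PySem.Dict.empty.insert (PySem.Str.find (data.headD "") "S") 1) 0 (by rw [hk]; simp)
  refine h.trans ?_
  rw [hk]
  simp [sIdx]

lemma main_eq (data : List String) : part1 data = part1_alt data := by
  by_cases h1 : 1 < data.length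
  · rw [A_eq data]
    have hA : specA (data.drop 1) {sIdx data}
        = ∑ r ∈ Finset.Ico 1 data.length, (rowCnt data r : Int) :=
      specA_sum data data.length 1 (by omega) le_rfl
    rw [hA]
    unfold part1_alt
    simp only [if_pos h1]
    rw [go_eq_gov]
    have h0 : ((PySem.Set.empty : PySem.Set (Nat × Int)).countP (markB data) : Int) = 0 := by
      simp [PySem.Set.empty]
    rw [show (PySem.Str.find (data.headD "") "S") = sIdx data from rfl,
      count_W data h1, h0]
    ring
  · rw [A_eq data]
    rw [List.drop_eq_nil_of_le (by omega)]
    unfold part1_alt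
    simp only [if_neg h1]
    simp [specA, part1_go]

-- ===== VERDICT (by name: the statement is the Claim_ definition above) =====
theorem part1_spec : Claim_equal_part1 := by
  intro data _ _
  unfold Spec_part1
  exact main_eq data
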